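-- pv_equiv track=rewrite | github.com/gherka/exhibit | exhibit/core/linkage/hierarchical.py | _merge_common_member_tuples
-- ===== SOURCE A (Python) =====
-- from collections import deque, defaultdict
--
-- class _CustomDict(defaultdict):
--     '''
--     Merging tuples involves sets which in turn involves arbitrary
--     sort order, breaking the parent-child relationships of the
--     initial pairs (Location Code, Location Desc).
--
--     Here we monkey-patch default dict so that on encountering a missing
--     key, the factory can make use of that key and create a custom
--     ordering list allowing us to recall the original sort order of the tuples
--     after they have been merged.
--
--     Key-value pairs look like {"A": [n, "A"]} where n is the "A"s position
--     in the pecking order of columns.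
--     '''
--
--     def __init__(self, f_of_x):
--         super().__init__(None) # base class doesn't get a factory
--         self.f_of_x = f_of_x # save f(x)
--     def __missing__(self, key): # called when a default needed
--         ret = self.f_of_x(key) # calculate default value
--         self[key] = ret # and install it in the dict
--         return ret
--
-- def _merge_common_member_tuples(paired_tuples):
--     '''
--     Merge tuples while preserving sort order
--     (codes are paired with descriptions, not the other way round)
--
--     The position in the original paried_tuples is important:
--     it's based on the average length of all values in each column
--     so in (Description, Code), Description is meant to go first
--
--     Parameters
--     ----------
--     paired_tuples : list
--         list of pairs of 1:1 linked columns
--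
--     Returns
--     -------
--     A list of tuples where common members have been merged into
--     a single new tuple:
--     Given [("A","B"), ("B","C"), ("D","E")] we want
--     [["A", "B", "C"], ["D", "E"]]
--     '''
--
--     original_sort_order = _CustomDict(lambda x: [None, x])
--     for a, b in paired_tuples:
--
--         if not original_sort_order[a][0]:
--             original_sort_order[a][0] = 0
--         else:
--             original_sort_order[a][0] -= 1
--
--         if not original_sort_order[b][0]:
--             original_sort_order[b][0] = 1
--
--     l = sorted(paired_tuples, key=min)
--     queue = deque(l)
--
--     grouped = []
--     while len(queue) >= 2:
--         l1 = queue.popleft()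
--         l2 = queue.popleft()
--         s1 = set(l1)
--         s2 = set(l2)
--
--         if s1 & s2:
--             queue.appendleft(s1 | s2)
--         else:
--             grouped.append(s1)
--             queue.appendleft(s2)
--     if queue:
--         grouped.append(queue.pop())
--
--     #convert back to mutable lists so that we can access indices
--     result = [list(sorted(x, key=lambda x: original_sort_order[x])) for x in grouped]
--     return result
-- ===== SOURCE B (Python) =====
-- def _merge_common_member_tuples(paired_tuples):
--     # Closed-form rank: a name sorts first (rank 0) iff its LAST occurrence in the
--     # flattened pair sequence is on the left; one reverse pass with setdefault.
--     rank = {}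
--     for a, b in reversed(paired_tuples):
--         rank.setdefault(b, 1)
--         rank.setdefault(a, 0)
--
--     def peel(tuples):
--         # split the maximal overlapping prefix off as one group, recurse on the rest
--         if not tuples:
--             return []
--         group = set(tuples[0])
--         k = 1
--         while k < len(tuples) and not group.isdisjoint(tuples[k]):
--             group.update(tuples[k])
--             k += 1
--         return [group] + peel(tuples[k:])
--
--     return [sorted(g, key=lambda e: (rank[e], e))
--             for g in peel(sorted(paired_tuples, key=min))]
-- ===== Notes on version B (the rewrite author's own statement) =====
-- stated objective: alternative
-- what changed: B replaces A's mutate-and-decrement _CustomDict bookkeeping with a closed-form rank (a name ranks 0 iff its last occurrence is on the left, built by one reverse setdefault pass) and replaces the deque two-pop/push-front rewriting loop with a recursive peel that splits the maximal overlapping prefix off the sorted list as one group and recurses on the remainder.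
-- intended difference: On a single pair whose two members are equal, e.g. [("A","A")], A returns [["A","A"]] with the member duplicated (the lone tuple bypasses the set conversion), while B returns [["A"]]; the function documents groups as merged sets of column names, so the deduplicated value is intended. — e.g. on _merge_common_member_tuples([("A", "A")]): A returns [["A", "A"]], B returns [["A"]]
import Mathlib
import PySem

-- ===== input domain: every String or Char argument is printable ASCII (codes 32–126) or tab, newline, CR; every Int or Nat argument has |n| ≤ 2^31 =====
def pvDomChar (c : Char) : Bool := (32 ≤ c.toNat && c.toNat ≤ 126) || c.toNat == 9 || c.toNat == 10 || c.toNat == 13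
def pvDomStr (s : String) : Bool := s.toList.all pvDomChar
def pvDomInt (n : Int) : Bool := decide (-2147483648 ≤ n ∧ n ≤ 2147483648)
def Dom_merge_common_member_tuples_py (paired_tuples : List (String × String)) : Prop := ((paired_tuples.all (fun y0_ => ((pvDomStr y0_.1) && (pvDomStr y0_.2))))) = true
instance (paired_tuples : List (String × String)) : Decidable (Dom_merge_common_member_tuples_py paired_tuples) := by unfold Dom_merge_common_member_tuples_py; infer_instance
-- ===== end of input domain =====

-- B replaces A's mutate-and-decrement _CustomDict bookkeeping by a closed-form rank built in
-- one reverse setdefault pass, and A's deque two-pop/push-front loop by a recursive peel of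
-- maximal overlapping prefixes (objective: alternative decomposition, same cost).

-- ===== PORT A =====
-- the _CustomDict bookkeeping loop body ('if not …[a][0]: … else …[a][0] -= 1; if not …[b][0]: …')
def pvStepA (d : PySem.Dict String Int) (p : String × String) : PySem.Dict String Int :=
  let d1 := match d.get? p.1 with
    | none => d.insert p.1 0
    | some v => if v = 0 then d.insert p.1 0 else d.insert p.1 (v - 1)
  match d1.get? p.2 with
  | none => d1.insert p.2 1
  | some v => if v = 0 then d1.insert p.2 1 else d1

def pvBuildOrder (paired_tuples : List (String × String)) : PySem.Dict String Int :=
  paired_tuples.foldl pvStepA PySem.Dict.empty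

-- sorted(x, key=lambda x: original_sort_order[x]) — the stored list [n, x] compares as the pair (n, x)
def pvSortGroup (d : PySem.Dict String Int) (g : List String) : List String :=
  PySem.List.sorted2 g (fun e => d.getD e 0) (fun e => e) false

-- A's while-loop over the deque (queue elements are lists of members; set(l) = Set.ofList l)
def pvLoopA (queue : List (List String)) (grouped : List (List String)) : List (List String) :=
  match queue with
  | [] => grouped
  | [x] => grouped ++ [x]
  | l1 :: l2 :: rest =>
    let s1 := PySem.Set.ofList l1
    let s2 := PySem.Set.ofList l2
    if PySem.Set.inter s1 s2 ≠ [] then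
      pvLoopA (PySem.Set.union s1 s2 :: rest) grouped
    else
      pvLoopA (s2 :: rest) (grouped ++ [s1])
termination_by queue.length
decreasing_by all_goals (simp; try omega)

def merge_common_member_tuples_py (paired_tuples : List (String × String)) : List (List String) :=
  let d := pvBuildOrder paired_tuples
  let l := PySem.List.sorted paired_tuples (fun p => min p.1 p.2) false
  let grouped := pvLoopA (l.map (fun p => [p.1, p.2])) []
  grouped.map (pvSortGroup d)

-- ===== PORT B =====
-- one reverse pass: rank.setdefault(b, 1); rank.setdefault(a, 0)
def pvStepB (d : PySem.Dict String Int) (p : String × String) : PySem.Dict String Int :=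
  (d.setdefault p.2 1).setdefault p.1 0

def pvRankDict (paired_tuples : List (String × String)) : PySem.Dict String Int :=
  paired_tuples.reverse.foldl pvStepB PySem.Dict.empty

-- the inner while: extend the group over the list while it overlaps, return (group, rest)
def pvExtend (group : PySem.Set String) (ts : List (String × String)) :
    PySem.Set String × List (String × String) :=
  match ts with
  | [] => (group, [])
  | t :: rest =>
    if PySem.Set.isdisjoint group [t.1, t.2] then (group, t :: rest)
    else pvExtend (PySem.Set.update group [t.1, t.2]) rest

lemma pvExtend_snd_le (group : PySem.Set String) (ts : List (String × String)) :
    (pvExtend group ts).2.length ≤ ts.length := by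
  induction ts generalizing group with
  | nil => simp [pvExtend]
  | cons t rest ih =>
    rw [pvExtend]
    split
    · simp
    · exact le_trans (ih _) (by simp)

-- peel(tuples): split the maximal overlapping prefix off as one group, recurse on the rest
def pvPeel (tuples : List (String × String)) : List (List String) :=
  match tuples with
  | [] => []
  | t :: rest =>
    let r := pvExtend (PySem.Set.ofList [t.1, t.2]) rest
    r.1 :: pvPeel r.2
termination_by tuples.length
decreasing_by
  simpa using Nat.lt_succ_of_le (pvExtend_snd_le _ _)

-- sorted(g, key=lambda e: (rank[e], e)); rank[e] is exact via getD: every group member occurs in paired_tuples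
def pvSortGroupB (d : PySem.Dict String Int) (g : List String) : List String :=
  PySem.List.sorted2 g (fun e => d.getD e 0) (fun e => e) false

def merge_common_member_tuples_py_alt (paired_tuples : List (String × String)) : List (List String) :=
  let rank := pvRankDict paired_tuples
  (pvPeel (PySem.List.sorted paired_tuples (fun p => min p.1 p.2) false)).map (pvSortGroupB rank)

-- ===== PRECONDITION & SPEC =====
-- On a single pair with equal members A returns that group with the member duplicated
-- ([("A","A")] → [["A","A"]]) because the lone tuple bypasses the set conversion, while B
-- returns [["A"]]; groups are documented as merged sets of column names, so B's value is intended.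
def D_merge_common_member_tuples_py (paired_tuples : List (String × String)) : Prop :=
  paired_tuples.length = 1 ∧ ∀ p ∈ paired_tuples, p.1 = p.2
instance (paired_tuples : List (String × String)) : Decidable (D_merge_common_member_tuples_py paired_tuples) := by unfold D_merge_common_member_tuples_py; infer_instance

def Spec_merge_common_member_tuples_py (paired_tuples : List (String × String)) (out : List (List String)) : Prop := ¬ D_merge_common_member_tuples_py paired_tuples → out = merge_common_member_tuples_py_alt paired_tuples
instance (paired_tuples : List (String × String)) (out : List (List String)) : Decidable (Spec_merge_common_member_tuples_py paired_tuples out) := by unfold Spec_merge_common_member_tuples_py; infer_instance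

def pvDiffWitness_merge_common_member_tuples_py : (List (String × String)) := [("A", "A")]
def pvDiffWitnessOut_merge_common_member_tuples_py : (List (List String)) × (List (List String)) := ([["A", "A"]], [["A"]])

-- ===== CLAIM (what is proved, stated in full; the proofs are below) =====
def Claim_unchanged_merge_common_member_tuples_py : Prop := ∀ (paired_tuples : List (String × String)), Dom_merge_common_member_tuples_py paired_tuples → Spec_merge_common_member_tuples_py paired_tuples (merge_common_member_tuples_py paired_tuples)
def Claim_changed_merge_common_member_tuples_py : Prop := Dom_merge_common_member_tuples_py (pvDiffWitness_merge_common_member_tuples_py) ∧ D_merge_common_member_tuples_py (pvDiffWitness_merge_common_member_tuples_py) ∧ merge_common_member_tuples_py (pvDiffWitness_merge_common_member_tuples_py) = pvDiffWitnessOut_merge_common_member_tuples_py.1 ∧ merge_common_member_tuples_py_alt (pvDiffWitness_merge_common_member_tuples_py) = pvDiffWitnessOut_merge_common_member_tuples_py.2 ∧ pvDiffWitnessOut_merge_common_member_tuples_py.1 ≠ pvDiffWitnessOut_merge_common_member_tuples_py.2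
def Claim_exact_merge_common_member_tuples_py : Prop := ∀ (paired_tuples : List (String × String)), Dom_merge_common_member_tuples_py paired_tuples → D_merge_common_member_tuples_py paired_tuples → merge_common_member_tuples_py paired_tuples ≠ merge_common_member_tuples_py_alt paired_tuples

-- ===== LEMMAS AND PROOFS =====

-- the tag a single pair gives a name (right occurrence wins over left within a pair)
def pvPairTag (p : String × String) (x : String) : Option Int :=
  if x = p.2 then some 1 else if x = p.1 then some 0 else none

-- the value both bookkeeping passes compute: the tag of x's LAST occurrence
def pvLastTag : List (String × String) → String → Option Int
  | [], _ => none
  | p :: ps, x => (pvLastTag ps x).or (pvPairTag p x)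

def pvFirstTag : List (String × String) → String → Option Int
  | [], _ => none
  | p :: ps, x => (pvPairTag p x).or (pvFirstTag ps x)

def pvInv (d : PySem.Dict String Int) : Prop := ∀ x v, d.get? x = some v → v = 0 ∨ v = 1

lemma pvInv_insert (d : PySem.Dict String Int) (k : String) (v : Int)
    (h : pvInv d) (hv : v = 0 ∨ v = 1) : pvInv (d.insert k v) := by
  intro x w hx
  rw [PySem.Dict.get?_insert] at hx
  split at hx
  · cases hx; exact hv
  · exact h x w hx

lemma pvStepA_d1 (d : PySem.Dict String Int) (p : String × String) (h : pvInv d) :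
    (match d.get? p.1 with
      | none => d.insert p.1 0
      | some v => if v = 0 then d.insert p.1 0 else d.insert p.1 (v - 1)) = d.insert p.1 0 := by
  rcases h1 : d.get? p.1 with _ | v
  · rfl
  · rcases h p.1 v h1 with hv | hv <;> simp [hv]

lemma pvStepA_get? (d : PySem.Dict String Int) (p : String × String) (x : String)
    (h : pvInv d) : (pvStepA d p).get? x = (pvPairTag p x).or (d.get? x) := by
  unfold pvStepA
  rw [pvStepA_d1 d p h]
  rcases h2 : (d.insert p.1 0).get? p.2 with _ | w
  · simp only [h2, PySem.Dict.get?_insert] at *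
    unfold pvPairTag
    split_ifs at * <;> simp_all [Option.or, PySem.Dict.get?_insert]
  · have hw : w = 0 ∨ w = 1 := pvInv_insert d p.1 0 h (Or.inl rfl) p.2 w h2
    simp only [h2]
    rcases hw with hw | hw <;> subst hw
    · simp only [PySem.Dict.get?_insert] at *
      unfold pvPairTag
      split_ifs at * <;> simp_all [Option.or, PySem.Dict.get?_insert]
    · rw [if_neg one_ne_zero]
      simp only [PySem.Dict.get?_insert] at *
      unfold pvPairTag
      split_ifs at * <;> simp_all [Option.or, PySem.Dict.get?_insert]

lemma pvStepA_inv (d : PySem.Dict String Int) (p : String × String)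
    (h : pvInv d) : pvInv (pvStepA d p) := by
  have h1 : pvInv (d.insert p.1 0) := pvInv_insert d p.1 0 h (Or.inl rfl)
  unfold pvStepA
  rw [pvStepA_d1 d p h]
  rcases h2 : (d.insert p.1 0).get? p.2 with _ | w
  · simp only [h2]
    exact pvInv_insert _ p.2 1 h1 (Or.inr rfl)
  · simp only [h2]
    split_ifs with hw
    · exact pvInv_insert _ p.2 1 h1 (Or.inr rfl)
    · exact h1

lemma pvFoldA_get? (ps : List (String × String)) (d : PySem.Dict String Int) (x : String)
    (h : pvInv d) : (ps.foldl pvStepA d).get? x = (pvLastTag ps x).or (d.get? x) := by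
  induction ps generalizing d with
  | nil => simp [pvLastTag]
  | cons p ps ih =>
    rw [List.foldl_cons, ih (pvStepA d p) (pvStepA_inv d p h), pvStepA_get? d p x h,
      pvLastTag, Option.or_assoc]

lemma pvStepB_get? (d : PySem.Dict String Int) (p : String × String) (x : String) :
    (pvStepB d p).get? x = (d.get? x).or (pvPairTag p x) := by
  unfold pvStepB pvPairTag
  by_cases hx1 : x = p.1 <;> by_cases hx2 : x = p.2
  · rw [← hx1, ← hx2, PySem.Dict.get?_setdefault_self, PySem.Dict.get?_setdefault_self,
      if_pos rfl]
    rcases d.get? x with _ | v <;> simp [Option.or]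
  · rw [← hx1, PySem.Dict.get?_setdefault_self, PySem.Dict.get?_setdefault_of_ne _ _ hx2,
      if_neg hx2, if_pos rfl]
    rcases d.get? x with _ | v <;> simp [Option.or]
  · rw [← hx2, PySem.Dict.get?_setdefault_of_ne _ _ hx1, PySem.Dict.get?_setdefault_self,
      if_pos rfl]
    rcases d.get? x with _ | v <;> simp [Option.or]
  · rw [PySem.Dict.get?_setdefault_of_ne _ _ hx1, PySem.Dict.get?_setdefault_of_ne _ _ hx2,
      if_neg hx2, if_neg hx1]
    rcases d.get? x with _ | v <;> simp [Option.or]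

lemma pvFoldB_get? (l : List (String × String)) (d : PySem.Dict String Int) (x : String) :
    (l.foldl pvStepB d).get? x = (d.get? x).or (pvFirstTag l x) := by
  induction l generalizing d with
  | nil => simp [pvFirstTag]
  | cons p l ih =>
    rw [List.foldl_cons, ih (pvStepB d p), pvStepB_get?, pvFirstTag, Option.or_assoc]

lemma pvFirstTag_append (l1 l2 : List (String × String)) (x : String) :
    pvFirstTag (l1 ++ l2) x = (pvFirstTag l1 x).or (pvFirstTag l2 x) := by
  induction l1 with
  | nil => simp [pvFirstTag]
  | cons p l1 ih => rw [List.cons_append, pvFirstTag, pvFirstTag, ih, Option.or_assoc]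

lemma pvFirstTag_reverse (ps : List (String × String)) (x : String) :
    pvFirstTag ps.reverse x = pvLastTag ps x := by
  induction ps with
  | nil => rfl
  | cons p ps ih =>
    rw [List.reverse_cons, pvFirstTag_append, ih, pvLastTag]
    simp [pvFirstTag]

lemma pvRank_agree (ps : List (String × String)) (x : String) :
    (pvBuildOrder ps).getD x 0 = (pvRankDict ps).getD x 0 := by
  have hA : (pvBuildOrder ps).get? x = pvLastTag ps x := by
    have := pvFoldA_get? ps PySem.Dict.empty x (by intro x v hx; simp [PySem.Dict.get?_empty] at hx)
    simpa [pvBuildOrder, PySem.Dict.get?_empty] using this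
  have hB : (pvRankDict ps).get? x = pvLastTag ps x := by
    have := pvFoldB_get? ps.reverse PySem.Dict.empty x
    simpa [pvRankDict, PySem.Dict.get?_empty, pvFirstTag_reverse] using this
  rw [PySem.Dict.getD_eq_get?_getD, PySem.Dict.getD_eq_get?_getD, hA, hB]

lemma pvSortGroup_agree (ps : List (String × String)) :
    pvSortGroup (pvBuildOrder ps) = pvSortGroupB (pvRankDict ps) := by
  have hk : (fun e => (pvBuildOrder ps).getD e 0) = (fun e => (pvRankDict ps).getD e 0) :=
    funext (pvRank_agree ps)
  funext g
  unfold pvSortGroup pvSortGroupB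
  rw [hk]

-- A's overlap test 'if s1 & s2' ↔ B's 'not group.isdisjoint(t)'
lemma pvCond_iff (c : PySem.Set String) (t : String × String) :
    PySem.Set.inter c (PySem.Set.ofList [t.1, t.2]) ≠ [] ↔
      ¬ PySem.Set.isdisjoint c [t.1, t.2] = true := by
  rw [PySem.Set.isdisjoint_iff, Ne, List.eq_nil_iff_forall_not_mem]
  push_neg
  constructor
  · rintro ⟨y, hy⟩
    rw [PySem.Set.mem_inter] at hy
    exact ⟨y, hy.1, by simpa [PySem.Set.mem_ofList] using hy.2⟩
  · rintro ⟨y, hy1, hy2⟩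
    exact ⟨y, by rw [PySem.Set.mem_inter]; exact ⟨hy1, by simpa [PySem.Set.mem_ofList] using hy2⟩⟩

lemma pvUnion_eq_update (c : PySem.Set String) (t : String × String) :
    PySem.Set.union c (PySem.Set.ofList [t.1, t.2]) = PySem.Set.update c [t.1, t.2] := by
  show PySem.Set.update c (PySem.Set.ofList [t.1, t.2]) = PySem.Set.update c [t.1, t.2]
  by_cases hyx : t.2 = t.1
  · have h1 : PySem.Set.ofList [t.1, t.2] = [t.1] := by
      rw [hyx]
      simp [PySem.Set.ofList_cons, PySem.Set.ofList_nil, PySem.Set.discard]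
    rw [h1, hyx]
    show PySem.Set.add c t.1 = PySem.Set.add (PySem.Set.add c t.1) t.1
    exact (PySem.Set.add_of_mem (s := PySem.Set.add c t.1) (x := t.1)
      (by rw [PySem.Set.mem_add]; exact Or.inr rfl)).symm
  · rw [PySem.Set.ofList_eq_self_of_nodup [t.1, t.2] (by simp; exact fun hh => hyx hh.symm)]

def pvPeelFrom (c : PySem.Set String) (ts : List (String × String)) : List (List String) :=
  (pvExtend c ts).1 :: pvPeel (pvExtend c ts).2

lemma pvLoop_eq_peel (ts : List (String × String)) (c : PySem.Set String)
    (g : List (List String)) (hc : c.Nodup) :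
    pvLoopA (c :: ts.map (fun p => [p.1, p.2])) g = g ++ pvPeelFrom c ts := by
  induction ts generalizing c g with
  | nil => simp [pvLoopA, pvPeelFrom, pvExtend, pvPeel]
  | cons t rest ih =>
    rw [List.map_cons, pvLoopA]
    rw [PySem.Set.ofList_eq_self_of_nodup c hc]
    by_cases hcond : PySem.Set.inter c (PySem.Set.ofList [t.1, t.2]) ≠ []
    · rw [if_pos hcond, pvUnion_eq_update, ih _ _ (PySem.Set.nodup_update c [t.1, t.2] hc)]
      have hnd : PySem.Set.isdisjoint c [t.1, t.2] = false :=
        Bool.eq_false_iff.mpr ((pvCond_iff c t).mp hcond)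
      simp [pvPeelFrom, pvExtend, hnd]
    · rw [if_neg hcond, ih _ _ (PySem.Set.nodup_ofList [t.1, t.2])]
      have hd : PySem.Set.isdisjoint c [t.1, t.2] = true := by
        by_contra hb
        exact hcond ((pvCond_iff c t).mpr hb)
      simp [pvPeelFrom, pvExtend, pvPeel, hd, List.append_assoc]

lemma pvLoopA_head_ofList (x : List String) (r : List (List String))
    (g : List (List String)) (hr : r ≠ []) :
    pvLoopA (x :: r) g = pvLoopA (PySem.Set.ofList x :: r) g := by
  cases r with
  | nil => exact absurd rfl hr
  | cons l2 r =>
    rw [pvLoopA, pvLoopA]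
    simp [PySem.Set.ofList_ofList]

lemma pvPerm_singleton {α : Type} {xs : List α} {a : α} (h : xs.Perm [a]) : xs = [a] := by
  have := h.length_eq
  match xs, this with
  | [x], _ => simpa using h

-- ===== VERDICT (by name: the statements are the Claim_ definitions above) =====
theorem merge_common_member_tuples_py_spec : Claim_unchanged_merge_common_member_tuples_py := by
  intro ps _ hnD
  show List.map (pvSortGroup (pvBuildOrder ps))
      (pvLoopA ((PySem.List.sorted ps (fun p => min p.1 p.2) false).map (fun p => [p.1, p.2])) []) =
    List.map (pvSortGroupB (pvRankDict ps))
      (pvPeel (PySem.List.sorted ps (fun p => min p.1 p.2) false))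
  rw [pvSortGroup_agree ps]
  cases hL : PySem.List.sorted ps (fun p => min p.1 p.2) false with
  | nil => simp [pvLoopA, pvPeel]
  | cons h t =>
    cases t with
    | nil =>
      have hps : ps = [h] := pvPerm_singleton (hL ▸ (PySem.List.sorted_perm ps _ _)).symm.symm.symm
      have hne : h.1 ≠ h.2 := by
        intro he
        exact hnD ⟨by simp [hps], by simp [hps, Prod.ext_iff, he]⟩
      have hnd : ([h.1, h.2] : List String).Nodup := by simp [hne]
      simp [pvLoopA, pvPeel, pvExtend, PySem.Set.ofList_eq_self_of_nodup _ hnd]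
    | cons q r =>
      simp only [List.map_cons]
      rw [pvLoopA_head_ofList [h.1, h.2] _ [] (by simp)]
      rw [show ([q.1, q.2] :: List.map (fun p => ([p.1, p.2] : List String)) r) =
            List.map (fun p => ([p.1, p.2] : List String)) (q :: r) from rfl]
      rw [pvLoop_eq_peel (q :: r) _ [] (PySem.Set.nodup_ofList _)]
      simp [pvPeel, pvPeelFrom]

set_option maxHeartbeats 1000000 in
theorem merge_common_member_tuples_py_changed : Claim_changed_merge_common_member_tuples_py := by
  unfold Claim_changed_merge_common_member_tuples_py
  refine ⟨by decide, by decide, ?_, ?_, by decide⟩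
  · simp [merge_common_member_tuples_py, pvBuildOrder, pvStepA, pvSortGroup, pvLoopA,
      pvDiffWitness_merge_common_member_tuples_py, pvDiffWitnessOut_merge_common_member_tuples_py,
      PySem.List.sorted, PySem.List.sorted2, PySem.List.insertBy,
      PySem.Dict.getD, PySem.Dict.get?, PySem.Dict.insert, PySem.Dict.empty]
  · simp [merge_common_member_tuples_py_alt, pvRankDict, pvStepB, pvSortGroupB, pvPeel, pvExtend,
      pvDiffWitness_merge_common_member_tuples_py, pvDiffWitnessOut_merge_common_member_tuples_py,
      PySem.List.sorted, PySem.List.sorted2, PySem.List.insertBy, PySem.Set.ofList,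
      PySem.Set.add, PySem.Dict.getD, PySem.Dict.get?,
      PySem.Dict.setdefault, PySem.Dict.empty, PySem.Dict.contains]

theorem merge_common_member_tuples_py_tight : Claim_exact_merge_common_member_tuples_py := by
  intro ps _ hD heq
  obtain ⟨hlen, hall⟩ := hD
  match ps, hlen with
  | [p], _ =>
    have hp : p.2 = p.1 := (hall p (by simp)).symm
    have hsort : PySem.List.sorted [p] (fun p => min p.1 p.2) false = [p] :=
      PySem.List.sorted_eq_self_of_pairwise _ _ (by simp)
    have hof : PySem.Set.ofList [p.1, p.2] = [p.1] := by
      rw [hp]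
      simp [PySem.Set.ofList_cons, PySem.Set.ofList_nil, PySem.Set.discard]
    have heq2 : List.map (pvSortGroup (pvBuildOrder [p])) (pvLoopA [[p.1, p.2]] []) =
        List.map (pvSortGroupB (pvRankDict [p])) (pvPeel [p]) := by
      have := heq
      unfold merge_common_member_tuples_py merge_common_member_tuples_py_alt at this
      simpa [hsort] using this
    rw [pvPeel] at heq2
    simp only [pvLoopA, pvExtend, hof, List.map_cons, List.map_nil, pvPeel,
      List.nil_append] at heq2
    have h2 : pvSortGroup (pvBuildOrder [p]) [p.1, p.2] = pvSortGroupB (pvRankDict [p]) [p.1] := by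
      simpa using heq2
    have hl2 : (pvSortGroup (pvBuildOrder [p]) [p.1, p.2]).length = 2 :=
      ((PySem.List.sorted2_perm _ _ _ _).length_eq).trans rfl
    have hl1 : (pvSortGroupB (pvRankDict [p]) [p.1]).length = 1 :=
      ((PySem.List.sorted2_perm _ _ _ _).length_eq).trans rfl
    rw [h2, hl1] at hl2
    exact absurd hl2 (by norm_num)
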